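-- pv_equiv track=rewrite | github.com/jevwithwind/Coordination_planner | backend/recommend.py | get_formality_keywords
-- ===== SOURCE A (Python) =====
-- def get_formality_keywords(user_message):
--     """Parse user message for formality keywords and return appropriate formality levels."""
--     user_msg_lower = user_message.lower()
--
--     # Business/formal keywords
--     if any(keyword in user_msg_lower for keyword in ["office", "meeting", "work", "interview", "business", "conference"]):
--         return ["business", "formal", "smart_casual"]
--
--     # Athletic/casual keywords
--     elif any(keyword in user_msg_lower for keyword in ["golf", "hiking", "gym", "running", "workout", "sports"]):
--         return ["athletic", "casual"]
--
--     # Social/formal events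
--     elif any(keyword in user_msg_lower for keyword in ["date", "dinner", "party", "wedding", "event"]):
--         return ["smart_casual", "formal", "business"]
--
--     # Casual activities
--     elif any(keyword in user_msg_lower for keyword in ["casual", "hangout", "weekend", "errand", "shopping"]):
--         return ["casual", "smart_casual"]
--
--     # No specific keywords found, return None to not filter by formality
--     else:
--         return None
-- ===== SOURCE B (Python) =====
-- # Min-priority scan: every keyword carries the priority of its group; one flat
-- # pass records the minimum priority among ALL matching keywords (no early
-- # return, no branch chain), then one lookup maps that priority to the result.
-- KEYWORD_PRIORITY = [
--     ("office", 0), ("meeting", 0), ("work", 0), ("interview", 0),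
--     ("business", 0), ("conference", 0),
--     ("golf", 1), ("hiking", 1), ("gym", 1), ("running", 1),
--     ("workout", 1), ("sports", 1),
--     ("date", 2), ("dinner", 2), ("party", 2), ("wedding", 2), ("event", 2),
--     ("casual", 3), ("hangout", 3), ("weekend", 3), ("errand", 3),
--     ("shopping", 3),
-- ]
--
-- RESULTS = [
--     ["business", "formal", "smart_casual"],
--     ["athletic", "casual"],
--     ["smart_casual", "formal", "business"],
--     ["casual", "smart_casual"],
-- ]
--
--
-- def get_formality_keywords(user_message):
--     """Minimum matching priority over a flat keyword list, then one lookup."""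
--     msg = user_message.lower()
--     best = None
--     for kw, p in KEYWORD_PRIORITY:
--         if kw in msg:
--             best = p if best is None else min(best, p)
--     if best is None:
--         return None
--     return list(RESULTS[best])
-- ===== Notes on version B (the rewrite author's own statement) =====
-- stated objective: alternative
-- what changed: Replaced A's four if/elif branch groups (first matching group wins, early return) with a single flat pass over all 22 (keyword, priority) pairs that accumulates the minimum matching priority, followed by one table lookup; correct because group priorities ascend in A's branch order, so the minimum matching priority is exactly A's first matching branch.
import Mathlib
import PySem

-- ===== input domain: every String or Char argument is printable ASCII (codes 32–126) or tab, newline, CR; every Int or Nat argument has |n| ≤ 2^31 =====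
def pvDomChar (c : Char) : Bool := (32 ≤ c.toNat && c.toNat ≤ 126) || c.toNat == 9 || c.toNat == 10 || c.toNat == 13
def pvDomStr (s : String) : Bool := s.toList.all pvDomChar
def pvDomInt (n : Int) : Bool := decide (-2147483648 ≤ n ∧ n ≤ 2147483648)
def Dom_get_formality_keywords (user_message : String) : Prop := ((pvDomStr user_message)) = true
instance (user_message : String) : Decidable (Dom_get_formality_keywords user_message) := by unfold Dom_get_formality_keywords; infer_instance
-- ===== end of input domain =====

-- B replaces A's if/elif branch chain by a flat min-priority scan over all
-- (keyword, priority) pairs followed by one table lookup (objective: alternative).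


-- ===== PORT A =====
def get_formality_keywords (user_message : String) : Option (List String) :=
  let user_msg_lower := PySem.Str.lower user_message
  if (["office", "meeting", "work", "interview", "business", "conference"].any
      (fun keyword => PySem.Str.isIn keyword user_msg_lower)) then
    some ["business", "formal", "smart_casual"]
  else if (["golf", "hiking", "gym", "running", "workout", "sports"].any
      (fun keyword => PySem.Str.isIn keyword user_msg_lower)) then
    some ["athletic", "casual"]
  else if (["date", "dinner", "party", "wedding", "event"].any
      (fun keyword => PySem.Str.isIn keyword user_msg_lower)) then
    some ["smart_casual", "formal", "business"]
  else if (["casual", "hangout", "weekend", "errand", "shopping"].any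
      (fun keyword => PySem.Str.isIn keyword user_msg_lower)) then
    some ["casual", "smart_casual"]
  else
    none

-- ===== PORT B =====
-- flat keyword table: each keyword tagged with the priority of its group
def fkKeywords : List (String × Nat) :=
  [("office", 0), ("meeting", 0), ("work", 0), ("interview", 0),
   ("business", 0), ("conference", 0),
   ("golf", 1), ("hiking", 1), ("gym", 1), ("running", 1),
   ("workout", 1), ("sports", 1),
   ("date", 2), ("dinner", 2), ("party", 2), ("wedding", 2), ("event", 2),
   ("casual", 3), ("hangout", 3), ("weekend", 3), ("errand", 3),
   ("shopping", 3)]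

def fkResults : List (List String) :=
  [["business", "formal", "smart_casual"],
   ["athletic", "casual"],
   ["smart_casual", "formal", "business"],
   ["casual", "smart_casual"]]

-- 'best = p if best is None else min(best, p)'
def fkStep (msg : String) (best : Option Nat) (kp : String × Nat) : Option Nat :=
  if PySem.Str.isIn kp.1 msg then
    some (match best with | none => kp.2 | some q => min q kp.2)
  else best

def get_formality_keywords_alt (user_message : String) : Option (List String) :=
  let msg := PySem.Str.lower user_message
  let best := fkKeywords.foldl (fkStep msg) none
  match best with
  | none => none
  | some p => some (fkResults.getD p [])

-- ===== PRECONDITION & SPEC =====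
def Spec_get_formality_keywords (user_message : String) (out : Option (List String)) : Prop := out = get_formality_keywords_alt user_message
instance (user_message : String) (out : Option (List String)) : Decidable (Spec_get_formality_keywords user_message out) := by unfold Spec_get_formality_keywords; infer_instance

-- ===== CLAIM =====
def Claim_equal_get_formality_keywords : Prop := ∀ (user_message : String), Dom_get_formality_keywords user_message → Spec_get_formality_keywords user_message (get_formality_keywords user_message)

-- ===== LEMMAS AND PROOFS =====

-- one constant-priority segment of the fold behaves like A's 'any' test
lemma fk_seg (msg : String) (p : Nat) (ks : List String) (acc : Option Nat) :
    (ks.map (fun k => (k, p))).foldl (fkStep msg) acc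
      = if ks.any (fun k => PySem.Str.isIn k msg) then
          some (match acc with | none => p | some q => min q p)
        else acc := by
  induction ks generalizing acc with
  | nil => simp
  | cons k ks ih =>
    simp only [List.map, List.foldl, List.any_cons, fkStep]
    by_cases h : PySem.Str.isIn k msg = true
    · simp only [h, if_pos rfl, ih, Bool.true_or, if_pos rfl]
      cases acc with
      | none => cases hks : ks.any (fun k => PySem.Str.isIn k msg) <;>
          simp
      | some q => cases hks : ks.any (fun k => PySem.Str.isIn k msg) <;>
          simp [Nat.min_assoc]
    · rw [Bool.not_eq_true] at h
      simp only [h, Bool.false_eq_true, if_false, Bool.false_or, ih]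

lemma fkKeywords_split :
    fkKeywords =
      (["office", "meeting", "work", "interview", "business", "conference"].map (fun k => (k, 0)))
      ++ (["golf", "hiking", "gym", "running", "workout", "sports"].map (fun k => (k, 1)))
      ++ (["date", "dinner", "party", "wedding", "event"].map (fun k => (k, 2)))
      ++ (["casual", "hangout", "weekend", "errand", "shopping"].map (fun k => (k, 3))) := rfl

-- ===== VERDICT =====
theorem get_formality_keywords_spec : Claim_equal_get_formality_keywords := by
  intro user_message _
  unfold Spec_get_formality_keywords get_formality_keywords get_formality_keywords_alt
  rw [fkKeywords_split]
  simp only [List.foldl_append, fk_seg]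
  split_ifs <;> rfl
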